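-- pv_equiv track=rewrite | github.com/mxwz/astrbot_plugin_zhanbu | xlr.py | get_dizhi_wuxing
-- ===== SOURCE A (Python) =====
-- def get_dizhi_wuxing(shichen):
--     """根据时辰获取地支五行"""
--     ranges = [(1, 3, '土'), (3, 5, '木'), (5, 7, '木'), (7, 9, '土'),
--               (9, 11, '火'), (11, 13, '火'), (13, 15, '土'), (15, 17, '金'),
--               (17, 19, '金'), (19, 21, '土'), (21, 23, '水')]
--
--     for start, end, wuxing in ranges:
--         if start <= shichen < end:
--             return wuxing
--     return '水'
-- ===== SOURCE B (Python) =====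
-- def get_dizhi_wuxing(shichen):
--     """根据时辰获取地支五行 — closed-form table index instead of a range scan."""
--     elements = ['土', '木', '木', '土', '火', '火', '土', '金', '金', '土', '水']
--     if 1 <= shichen < 23:
--         return elements[int((shichen - 1) // 2)]
--     return '水'
-- ===== Notes on version B (the rewrite author's own statement) =====
-- stated objective: simpler
-- what changed: Replaces the linear scan over eleven (start,end,element) range triples with a single bound check followed by a direct table lookup at the half of the shifted hour.
import Mathlib
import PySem

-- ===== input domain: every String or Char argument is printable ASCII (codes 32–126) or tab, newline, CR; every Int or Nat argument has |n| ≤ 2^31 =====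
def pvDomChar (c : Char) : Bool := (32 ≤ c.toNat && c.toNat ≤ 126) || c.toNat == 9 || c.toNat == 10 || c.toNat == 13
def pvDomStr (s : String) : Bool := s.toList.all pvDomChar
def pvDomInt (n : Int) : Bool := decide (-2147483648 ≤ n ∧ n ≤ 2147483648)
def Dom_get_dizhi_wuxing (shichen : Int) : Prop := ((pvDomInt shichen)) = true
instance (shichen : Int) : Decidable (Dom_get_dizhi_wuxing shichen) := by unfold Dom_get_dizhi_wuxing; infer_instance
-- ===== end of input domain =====

-- B replaces A's range-scan loop with a single bound check and a closed-form table index (objective: simpler).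


-- ===== PORT A =====
def pvRangesA : List (Int × Int × String) :=
  [(1, 3, "土"), (3, 5, "木"), (5, 7, "木"), (7, 9, "土"),
   (9, 11, "火"), (11, 13, "火"), (13, 15, "土"), (15, 17, "金"),
   (17, 19, "金"), (19, 21, "土"), (21, 23, "水")]

def pvLoopA (shichen : Int) : List (Int × Int × String) → String
  | [] => "水"
  | (s, e, w) :: rest => if s ≤ shichen ∧ shichen < e then w else pvLoopA shichen rest

def get_dizhi_wuxing (shichen : Int) : String := pvLoopA shichen pvRangesA

-- ===== PORT B =====
def pvElemsB : List String := ["土", "木", "木", "土", "火", "火", "土", "金", "金", "土", "水"]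

def get_dizhi_wuxing_alt (shichen : Int) : String :=
  if 1 ≤ shichen ∧ shichen < 23 then
    (PySem.List.pyGet? pvElemsB (PySem.Int.floordiv (shichen - 1) 2)).getD "水"
  else "水"

-- ===== PRECONDITION & SPEC =====
def Spec_get_dizhi_wuxing (shichen : Int) (out : String) : Prop := out = get_dizhi_wuxing_alt shichen
instance (shichen : Int) (out : String) : Decidable (Spec_get_dizhi_wuxing shichen out) := by unfold Spec_get_dizhi_wuxing; infer_instance

-- ===== CLAIM (what is proved, stated in full; the proofs are below) =====
def Claim_equal_get_dizhi_wuxing : Prop := ∀ (shichen : Int), Dom_get_dizhi_wuxing shichen → Spec_get_dizhi_wuxing shichen (get_dizhi_wuxing shichen)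

-- ===== LEMMAS AND PROOFS =====

theorem pvLoopA_nil (shichen : Int) : pvLoopA shichen [] = "水" := rfl

theorem pvLoopA_cons (shichen a b : Int) (w : String) (rest : List (Int × Int × String)) :
    pvLoopA shichen ((a, b, w) :: rest) =
      if a ≤ shichen ∧ shichen < b then w else pvLoopA shichen rest := rfl

-- ===== VERDICT (by name: the statement is the Claim_ definition above) =====
theorem get_dizhi_wuxing_spec : Claim_equal_get_dizhi_wuxing := by
  intro s _
  unfold Spec_get_dizhi_wuxing
  by_cases h : 1 ≤ s ∧ s < 23
  · obtain ⟨h1, h2⟩ := h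
    interval_cases s <;> decide
  · have hb : get_dizhi_wuxing_alt s = "水" := by
      unfold get_dizhi_wuxing_alt; rw [if_neg h]
    rw [hb]
    unfold get_dizhi_wuxing pvRangesA
    rw [pvLoopA_cons, pvLoopA_cons, pvLoopA_cons, pvLoopA_cons, pvLoopA_cons,
        pvLoopA_cons, pvLoopA_cons, pvLoopA_cons, pvLoopA_cons, pvLoopA_cons,
        pvLoopA_cons, pvLoopA_nil,
        if_neg (show ¬((1:Int) ≤ s ∧ s < 3) by omega),
        if_neg (show ¬((3:Int) ≤ s ∧ s < 5) by omega),
        if_neg (show ¬((5:Int) ≤ s ∧ s < 7) by omega),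
        if_neg (show ¬((7:Int) ≤ s ∧ s < 9) by omega),
        if_neg (show ¬((9:Int) ≤ s ∧ s < 11) by omega),
        if_neg (show ¬((11:Int) ≤ s ∧ s < 13) by omega),
        if_neg (show ¬((13:Int) ≤ s ∧ s < 15) by omega),
        if_neg (show ¬((15:Int) ≤ s ∧ s < 17) by omega),
        if_neg (show ¬((17:Int) ≤ s ∧ s < 19) by omega),
        if_neg (show ¬((19:Int) ≤ s ∧ s < 21) by omega),
        if_neg (show ¬((21:Int) ≤ s ∧ s < 23) by omega)]
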